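-- pv_equiv track=rewrite | github.com/Abstrakten/webIntCourse | shing.py | shing
-- ===== SOURCE A (Python) =====
-- def shing(st, l):
--
--     termList = st.split(' ')
--
--     finalList = set()
--
--     for (i,x) in enumerate(termList):
--         lst = termList[i:i+l]
--         if(len(lst) == l):
--             finalList.add(" ".join(lst))
--
--     return finalList
-- ===== SOURCE B (Python) =====
-- def shing(st, l):
--     termList = st.split(' ')
--     if l == 0:
--         return {""}
--     if l < 0:
--         return set()
--     finalList = set()
--     window = []
--     for w in termList:
--         window.append(w)
--         if len(window) == l:
--             finalList.add(" ".join(window))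
--             window.pop(0)
--     return finalList
-- ===== Notes on version B (the rewrite author's own statement) =====
-- stated objective: alternative
-- what changed: Replaces A's enumerate-every-index loop that re-slices the word list at each start with a single streaming pass that carries a running window of the last l words (append one word, emit the join when the window fills, drop the oldest), plus explicit guards for the degenerate l==0 and l<0 cases.
import Mathlib
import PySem

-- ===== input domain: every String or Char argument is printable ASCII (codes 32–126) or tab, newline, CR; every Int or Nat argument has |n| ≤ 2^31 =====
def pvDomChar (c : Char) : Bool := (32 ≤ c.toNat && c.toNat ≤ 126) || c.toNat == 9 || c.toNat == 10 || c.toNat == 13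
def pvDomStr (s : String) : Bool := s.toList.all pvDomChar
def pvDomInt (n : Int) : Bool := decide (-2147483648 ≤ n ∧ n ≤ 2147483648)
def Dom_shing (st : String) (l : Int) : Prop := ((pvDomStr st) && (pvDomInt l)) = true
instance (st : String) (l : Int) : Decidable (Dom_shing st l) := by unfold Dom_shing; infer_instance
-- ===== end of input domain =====

-- B replaces A's index-enumerate-and-reslice loop by one streaming pass that carries a
-- running window of the last l words, with explicit guards for l == 0 / l < 0 (objective: alternative).

-- ===== PORT A =====
def shing (st : String) (l : Int) : List String :=
  let termList := (PySem.Str.split? st " ").getD []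
  (PySem.List.enumerate termList).foldl
    (fun finalList ix =>
      let lst := PySem.List.slice termList (some ix.1) (some (ix.1 + l))
      if ((lst.length : Int) = l) then PySem.Set.add finalList (PySem.Str.join " " lst)
      else finalList)
    PySem.Set.empty

-- ===== PORT B =====
def shing_alt (st : String) (l : Int) : List String :=
  let termList := (PySem.Str.split? st " ").getD []
  if l = 0 then [""]
  else if l < 0 then []
  else
    (termList.foldl
      (fun (p : List String × PySem.Set String) w =>
        let window := p.1 ++ [w]
        if ((window.length : Int) = l) then
          -- window.pop(0) on the just-filled (nonempty) window drops its head
          (window.drop 1, PySem.Set.add p.2 (PySem.Str.join " " window))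
        else (window, p.2))
      ([], PySem.Set.empty)).2

-- ===== PRECONDITION & SPEC =====
def Spec_shing (st : String) (l : Int) (out : List String) : Prop := out = shing_alt st l
instance (st : String) (l : Int) (out : List String) : Decidable (Spec_shing st l out) := by unfold Spec_shing; infer_instance

-- ===== CLAIM (what is proved, stated in full; the proofs are below) =====
def Claim_equal_shing : Prop := ∀ (st : String) (l : Int), Dom_shing st l → Spec_shing st l (shing st l)

-- ===== LEMMAS AND PROOFS =====

-- s.split(sep) never returns an empty list of pieces
lemma splitOn_go_ne_nil (sep : List Char) :
    ∀ fuel l cur acc, PySem.Chars.splitOn.go sep fuel l cur acc ≠ [] := by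
  intro fuel
  induction fuel with
  | zero => intro l cur acc; simp [PySem.Chars.splitOn.go]
  | succ n ih =>
      intro l cur acc
      cases l with
      | nil => simp [PySem.Chars.splitOn.go]
      | cons c rest =>
          rw [PySem.Chars.splitOn.go]
          split
          · exact ih _ _ _
          · exact ih _ _ _

lemma split_ne_nil (st : String) : (PySem.Str.split? st " ").getD [] ≠ [] := by
  simp [PySem.Str.split?, PySem.Chars.split?, PySem.Chars.splitOn]
  exact splitOn_go_ne_nil _ _ _ _ _

lemma clampIdx_of_nonneg (n : ℕ) (i : Int) (h : 0 ≤ i) :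
    PySem.List.clampIdx n i = min i.toNat n := by
  simp [PySem.List.clampIdx, not_lt.mpr h]

lemma slice_self_nil {α : Type} (xs : List α) (i : Int) :
    PySem.List.slice xs (some i) (some i) = [] := by
  have h := PySem.List.length_slice xs i i
  exact List.eq_nil_of_length_eq_zero (by omega)

lemma foldl_id {α β : Type} (r : List α) (a : β) :
    r.foldl (fun s _ => s) a = a := by
  induction r generalizing a with
  | nil => rfl
  | cons x xs ih => exact ih a

lemma foldl_add_mem (r : List Int) (acc : PySem.Set String) (h : "" ∈ acc) :
    r.foldl (fun s _ => PySem.Set.add s "") acc = acc := by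
  induction r with
  | nil => rfl
  | cons x xs ih =>
      have : PySem.Set.add acc "" = acc := by
        simp [PySem.Set.add, PySem.Set.contains, h]
      simpa [this] using ih

-- A's loop, re-expressed over the range of window starts
lemma core (ts : List String) (l : Int) (hts : ts ≠ []) :
    (PySem.List.enumerate ts).foldl
      (fun finalList ix =>
        let lst := PySem.List.slice ts (some ix.1) (some (ix.1 + l))
        if ((lst.length : Int) = l) then PySem.Set.add finalList (PySem.Str.join " " lst)
        else finalList)
      PySem.Set.empty
    = (if l = 0 then [""]
       else if l < 0 then []
       else
         PySem.Set.ofList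
           ((PySem.List.pyRange 0 ((ts.length : Int) - l + 1) 1).map
             (fun i => PySem.Str.join " " (PySem.List.slice ts (some i) (some (i + l)))))) := by
  have hmap : (PySem.List.enumerate ts).map (·.1) = PySem.List.pyRange 0 (ts.length : Int) := by
    simpa using PySem.List.map_fst_enumerate ts 0
  have hA : (PySem.List.enumerate ts).foldl
      (fun finalList ix =>
        let lst := PySem.List.slice ts (some ix.1) (some (ix.1 + l))
        if ((lst.length : Int) = l) then PySem.Set.add finalList (PySem.Str.join " " lst)
        else finalList)
      PySem.Set.empty
      = (PySem.List.pyRange 0 (ts.length : Int)).foldl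
      (fun finalList i =>
        let lst := PySem.List.slice ts (some i) (some (i + l))
        if ((lst.length : Int) = l) then PySem.Set.add finalList (PySem.Str.join " " lst)
        else finalList)
      PySem.Set.empty := by
    rw [← hmap, List.foldl_map]
  rw [hA]
  have hpos : 0 < ts.length := List.length_pos_iff.mpr hts
  by_cases hl0 : l = 0
  · subst hl0
    rw [if_pos rfl]
    rw [PySem.List.foldl_congr_mem _ _ (fun fl _ => PySem.Set.add fl "") _ ?_]
    · rw [PySem.List.pyRange_one_cons (by exact_mod_cast hpos)]
      simp only [List.foldl_cons]
      rw [show PySem.Set.add PySem.Set.empty "" = [""] from rfl]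
      exact foldl_add_mem _ _ (by simp)
    · intro acc i _
      simp only [add_zero, slice_self_nil]
      rfl
  · by_cases hlneg : l < 0
    · rw [if_neg hl0, if_pos hlneg]
      rw [PySem.List.foldl_congr_mem _ _ (fun fl _ => fl) _ ?_]
      · exact foldl_id _ _
      · intro acc i _
        simp only
        rw [if_neg (show ¬ ((PySem.List.slice ts (some i) (some (i + l))).length : Int) = l by omega)]
    · -- 0 < l
      have hl : 0 < l := by omega
      rw [if_neg hl0, if_neg hlneg]
      rw [show PySem.Set.ofList
           (List.map (fun i => PySem.Str.join " " (PySem.List.slice ts (some i) (some (i + l))))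
             (PySem.List.pyRange 0 ((ts.length : Int) - l + 1)))
         = (PySem.List.pyRange 0 ((ts.length : Int) - l + 1)).foldl
             (fun s i => PySem.Set.add s (PySem.Str.join " " (PySem.List.slice ts (some i) (some (i + l)))))
             PySem.Set.empty from by
           rw [PySem.Set.ofList_eq_foldl, List.foldl_map]; rfl]
      by_cases hnl : (ts.length : Int) - l + 1 ≤ 0
      · rw [PySem.List.pyRange_one_eq_nil hnl, List.foldl_nil]
        rw [PySem.List.foldl_congr_mem _ _ (fun fl _ => fl) _ ?_]
        · exact foldl_id _ _
        · intro acc i hi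
          have hib := (PySem.List.mem_pyRange_one).mp hi
          simp only
          rw [if_neg ?_]
          have hlen := PySem.List.length_slice ts i (i + l)
          rw [clampIdx_of_nonneg _ _ (by omega), clampIdx_of_nonneg _ _ (by omega)] at hlen
          omega
      · rw [PySem.List.pyRange_one_append 0 ((ts.length : Int) - l + 1) (ts.length : Int)
              (by omega) (by omega), List.foldl_append]
        rw [PySem.List.foldl_congr_mem (PySem.List.pyRange 0 ((ts.length : Int) - l + 1)) _
             (fun s i => PySem.Set.add s (PySem.Str.join " " (PySem.List.slice ts (some i) (some (i + l))))) _ ?_]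
        · rw [PySem.List.foldl_congr_mem (PySem.List.pyRange ((ts.length : Int) - l + 1) (ts.length : Int)) _
               (fun fl _ => fl) _ ?_]
          · exact foldl_id _ _
          · intro acc i hi
            have hib := (PySem.List.mem_pyRange_one).mp hi
            simp only
            rw [if_neg ?_]
            have hlen := PySem.List.length_slice ts i (i + l)
            rw [clampIdx_of_nonneg _ _ (by omega), clampIdx_of_nonneg _ _ (by omega)] at hlen
            omega
        · intro acc i hi
          have hib := (PySem.List.mem_pyRange_one).mp hi
          simp only
          rw [if_pos ?_]
          have hlen := PySem.List.length_slice ts i (i + l)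
          rw [clampIdx_of_nonneg _ _ (by omega), clampIdx_of_nonneg _ _ (by omega)] at hlen
          omega

-- the list of length-L word windows of ts, in order of their start index
def wins (L : ℕ) : List String → List (List String)
  | [] => []
  | x :: rest => if L ≤ (x :: rest).length then (x :: rest).take L :: wins L rest else []

lemma wins_eq (L : ℕ) (hL : 1 ≤ L) (ts : List String) :
    wins L ts = (List.range (ts.length + 1 - L)).map (fun i => (ts.drop i).take L) := by
  induction ts with
  | nil => simp [wins, Nat.sub_eq_zero_of_le hL]
  | cons x rest ih =>
      by_cases h : L ≤ (x :: rest).length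
      · rw [wins, if_pos h, ih]
        have h1 : (x :: rest).length + 1 - L = ((x :: rest).length - L) + 1 := by omega
        have h2 : rest.length + 1 - L = (x :: rest).length - L := by simp only [List.length_cons] at h ⊢
        rw [h1, h2, List.range_succ_eq_map, List.map_cons, List.map_map]
        simp [Function.comp_def]
      · rw [wins, if_neg h]
        have : (x :: rest).length + 1 - L = 0 := by simp at h ⊢; omega
        rw [this]; simp

lemma wins_nil_of_short (L : ℕ) (hL : 1 ≤ L) (w : List String) (hw : w.length < L) :
    wins L w = [] := by
  rw [wins_eq L hL, Nat.sub_eq_zero_of_le (by omega)]; simp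

lemma wins_cons_of_full (L : ℕ) (hL : 1 ≤ L) (xs : List String) (h : L ≤ xs.length) :
    wins L xs = xs.take L :: wins L (xs.drop 1) := by
  rw [wins_eq L hL, wins_eq L hL]
  have h1 : xs.length + 1 - L = (xs.length - L) + 1 := by omega
  have h2 : (xs.drop 1).length + 1 - L = xs.length - L := by simp; omega
  rw [h1, h2, List.range_succ_eq_map, List.map_cons, List.map_map]
  simp only [List.drop_zero]
  congr 1
  apply List.map_congr_left
  intro i _
  simp

-- the streaming pass with carried window w (|w| < L) collects exactly the windows of w ++ ws
lemma stream (L : ℕ) (hL : 1 ≤ L) :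
    ∀ (ws w : List String) (S : PySem.Set String), w.length < L →
    (ws.foldl
      (fun (p : List String × PySem.Set String) x =>
        let window := p.1 ++ [x]
        if ((window.length : Int) = (L : Int)) then
          (window.drop 1, PySem.Set.add p.2 (PySem.Str.join " " window))
        else (window, p.2))
      (w, S)).2
    = (wins L (w ++ ws)).foldl (fun s j => PySem.Set.add s (PySem.Str.join " " j)) S := by
  intro ws
  induction ws with
  | nil =>
      intro w S hw
      simp [wins_nil_of_short L hL w hw]
  | cons x rest ih =>
      intro w S hw
      simp only [List.foldl_cons]
      by_cases hfull : (w ++ [x]).length = L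
      · have hf' : w.length + 1 = L := by simpa using hfull
        rw [if_pos (by rw [hfull])]
        have hne : w ++ x :: rest = (w ++ [x]) ++ rest := by simp
        rw [hne, wins_cons_of_full L hL _ (by simp; omega)]
        have htake : ((w ++ [x]) ++ rest).take L = w ++ [x] := by
          rw [← hfull]; exact List.take_left
        have hdrop : ((w ++ [x]) ++ rest).drop 1 = (w ++ [x]).drop 1 ++ rest := by
          rw [List.drop_append_of_le_length (by simp)]
        rw [htake, hdrop, List.foldl_cons]
        rw [← ih ((w ++ [x]).drop 1) _ (by simp; omega)]
      · rw [if_neg (fun hcast => hfull (by exact_mod_cast hcast))]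
        have hne : w ++ x :: rest = (w ++ [x]) ++ rest := by simp
        rw [hne, ← ih (w ++ [x]) S (by simp at hfull ⊢; omega)]

-- B's positive branch, re-expressed over the range of window starts
lemma alt_core (ts : List String) (l : Int) (hl : 0 < l) :
    (ts.foldl
      (fun (p : List String × PySem.Set String) w =>
        let window := p.1 ++ [w]
        if ((window.length : Int) = l) then
          (window.drop 1, PySem.Set.add p.2 (PySem.Str.join " " window))
        else (window, p.2))
      ([], PySem.Set.empty)).2
    = PySem.Set.ofList
        ((PySem.List.pyRange 0 ((ts.length : Int) - l + 1) 1).map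
          (fun i => PySem.Str.join " " (PySem.List.slice ts (some i) (some (i + l))))) := by
  set L := l.toNat with hLdef
  have hlL : l = (L : Int) := by omega
  have hL1 : 1 ≤ L := by omega
  rw [hlL]
  rw [stream L hL1 ts [] PySem.Set.empty (by simpa using hL1)]
  simp only [List.nil_append]
  rw [PySem.Set.ofList_eq_foldl, List.foldl_map]
  rw [wins_eq L hL1 ts]
  have hrange : PySem.List.pyRange 0 ((ts.length : Int) - (L : Int) + 1) 1
      = (List.range (ts.length + 1 - L)).map (fun k => ((k : ℕ) : Int)) := by
    rw [PySem.List.pyRange_one]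
    have : ((ts.length : Int) - (L : Int) + 1 - 0).toNat = ts.length + 1 - L := by omega
    rw [this]
    simp
  rw [hrange, List.foldl_map, List.foldl_map]
  apply PySem.List.foldl_congr_mem
  intro acc i _
  rw [PySem.List.slice_natCast_add]

-- ===== VERDICT (by name: the statement is the Claim_ definition above) =====
theorem shing_spec : Claim_equal_shing := by
  intro st l _
  unfold Spec_shing shing shing_alt
  rw [core _ l (split_ne_nil st)]
  by_cases hl0 : l = 0
  · simp [hl0]
  · by_cases hlneg : l < 0
    · simp [hl0, hlneg]
    · rw [if_neg hl0, if_neg hlneg, if_neg hl0, if_neg hlneg]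
      exact (alt_core _ l (by omega)).symm
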